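-- pv_equiv track=rewrite | github.com/fenyorigo/indexer | app/core/exiftool.py | _split_hierarchical
-- ===== SOURCE A (Python) =====
-- def _split_hierarchical(values: list[str]) -> list[str]:
--     result: list[str] = []
--     for value in values:
--         if "," not in value:
--             result.append(value)
--             continue
--         result.extend(_split_commas_outside_parens(value))
--     return result
--
-- def _split_commas_outside_parens(value: str) -> list[str]:
--     items: list[str] = []
--     buf: list[str] = []
--     depth = 0
--     for ch in value:
--         if ch == "(":
--             depth += 1
--         elif ch == ")" and depth > 0:
--             depth -= 1
--         if ch == "," and depth == 0:
--             part = "".join(buf).strip()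
--             if part:
--                 items.append(part)
--             buf = []
--             continue
--         buf.append(ch)
--     part = "".join(buf).strip()
--     if part:
--         items.append(part)
--     return items
-- ===== SOURCE B (Python) =====
-- def _split_hierarchical(values: list[str]) -> list[str]:
--     return [part
--             for value in values
--             for part in (_split_commas_outside_parens(value) if "," in value else [value])]
--
-- def _advance(depth: int, piece: str) -> int:
--     # reduce the piece to its canonical ")"*a + "("*b shape, then apply it to depth
--     a = 0
--     b = 0
--     for ch in piece:
--         if ch == "(":
--             b += 1
--         elif ch == ")":
--             if b > 0:
--                 b -= 1
--             else:
--                 a += 1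
--     return max(depth - a, 0) + b
--
-- def _split_commas_outside_parens(value: str) -> list[str]:
--     pieces = value.split(",")
--     items: list[str] = []
--     cur = pieces[0]
--     depth = _advance(0, pieces[0])
--     for p in pieces[1:]:
--         if depth == 0:
--             part = cur.strip()
--             if part:
--                 items.append(part)
--             cur = p
--         else:
--             cur = cur + "," + p
--         depth = _advance(depth, p)
--     part = cur.strip()
--     if part:
--         items.append(part)
--     return items
-- ===== Notes on version B (the rewrite author's own statement) =====
-- stated objective: alternative
-- what changed: B splits each value on ALL commas first, summarises every piece's parentheses as a canonical ')'*a+'('*b pair to advance the depth, and re-merges the pieces whose separating comma sat at positive depth, instead of A's single char-by-char scan with a growing character buffer.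
import Mathlib
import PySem

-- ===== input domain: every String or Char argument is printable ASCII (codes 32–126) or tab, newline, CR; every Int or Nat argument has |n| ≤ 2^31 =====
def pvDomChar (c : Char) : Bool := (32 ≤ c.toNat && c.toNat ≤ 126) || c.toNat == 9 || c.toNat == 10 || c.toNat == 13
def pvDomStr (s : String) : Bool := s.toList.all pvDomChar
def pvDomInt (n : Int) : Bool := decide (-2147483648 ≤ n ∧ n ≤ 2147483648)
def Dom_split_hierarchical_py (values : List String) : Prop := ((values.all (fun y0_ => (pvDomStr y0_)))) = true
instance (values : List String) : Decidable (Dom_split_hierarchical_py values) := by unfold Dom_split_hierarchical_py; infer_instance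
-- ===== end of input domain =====

-- B replaces A's single char-by-char scan by split-on-all-commas + per-piece parenthesis
-- summaries that re-merge pieces cut at positive depth (alternative decomposition, same cost).

-- ===== PORT A =====
-- 'part = "".join(buf).strip(); if part: items.append(part)'
def pvFlushA (buf : List Char) : List String :=
  let part := PySem.Chars.strip buf
  if part = [] then [] else [String.ofList part]

-- the 'for ch in value' loop of _split_commas_outside_parens, state (items, buf, depth)
def pvLoopA (cs : List Char) (items : List String) (buf : List Char) (depth : Int) : List String :=
  match cs with
  | [] => items ++ pvFlushA buf
  | c :: rest =>
    let depth' : Int := if c = '(' then depth + 1 else if c = ')' ∧ depth > 0 then depth - 1 else depth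
    if c = ',' ∧ depth' = 0 then
      pvLoopA rest (items ++ pvFlushA buf) [] depth'
    else
      pvLoopA rest items (buf ++ [c]) depth'

def pvSplitCommasA (value : String) : List String :=
  pvLoopA value.toList [] [] 0

def split_hierarchical_py (values : List String) : List String :=
  values.foldl (fun result value =>
    if ¬ PySem.Str.isIn "," value then result ++ [value]
    else result ++ pvSplitCommasA value) []

-- ===== PORT B =====
-- _advance: canonical ")"*a + "("*b summary of the piece, applied to depth
def pvAdvance (depth : Int) (piece : List Char) : Int :=
  let ab := piece.foldl (fun (ab : Int × Int) ch =>
    if ch = '(' then (ab.1, ab.2 + 1)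
    else if ch = ')' then (if ab.2 > 0 then (ab.1, ab.2 - 1) else (ab.1 + 1, ab.2))
    else ab) (0, 0)
  max (depth - ab.1) 0 + ab.2

-- 'part = cur.strip(); if part: items.append(part)'
def pvFlushB (cur : List Char) : List String :=
  let part := PySem.Chars.strip cur
  if part = [] then [] else [String.ofList part]

-- the 'for p in pieces[1:]' loop, state (items, cur, depth)
def pvLoopB (ps : List (List Char)) (cur : List Char) (depth : Int) (items : List String) : List String :=
  match ps with
  | [] => items ++ pvFlushB cur
  | p :: rest =>
    if depth = 0 then pvLoopB rest p (pvAdvance depth p) (items ++ pvFlushB cur)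
    else pvLoopB rest (cur ++ ',' :: p) (pvAdvance depth p) items

def pvSplitCommasB (value : String) : List String :=
  match value.toList.splitOn ',' with
  | [] => []   -- unreachable: str.split always returns at least one piece
  | p0 :: ps => pvLoopB ps p0 (pvAdvance 0 p0) []

def split_hierarchical_py_alt (values : List String) : List String :=
  values.flatMap (fun value =>
    if PySem.Str.isIn "," value then pvSplitCommasB value else [value])

-- ===== PRECONDITION & SPEC =====
def Spec_split_hierarchical_py (values : List String) (out : List String) : Prop := out = split_hierarchical_py_alt values
instance (values : List String) (out : List String) : Decidable (Spec_split_hierarchical_py values out) := by unfold Spec_split_hierarchical_py; infer_instance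

-- ===== CLAIM (what is proved, stated in full; the proofs are below) =====
def Claim_equal_split_hierarchical_py : Prop := ∀ (values : List String), Dom_split_hierarchical_py values → Spec_split_hierarchical_py values (split_hierarchical_py values)

-- ===== LEMMAS AND PROOFS =====

-- one Python char-step of A's depth update
def pvCharStep (d : Int) (c : Char) : Int :=
  if c = '(' then d + 1 else if c = ')' ∧ d > 0 then d - 1 else d

def pvAB (p : List Char) : Int × Int :=
  p.foldl (fun (ab : Int × Int) ch =>
    if ch = '(' then (ab.1, ab.2 + 1)
    else if ch = ')' then (if ab.2 > 0 then (ab.1, ab.2 - 1) else (ab.1 + 1, ab.2))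
    else ab) (0, 0)

lemma pvAdvance_eq (d : Int) (p : List Char) :
    pvAdvance d p = max (d - (pvAB p).1) 0 + (pvAB p).2 := rfl

-- the (a,b) summary applies to any starting depth like the char-by-char run
lemma pvAB_spec (p : List Char) :
    0 ≤ (pvAB p).1 ∧ 0 ≤ (pvAB p).2 ∧
      ∀ d : Int, 0 ≤ d → max (d - (pvAB p).1) 0 + (pvAB p).2 = p.foldl pvCharStep d := by
  induction p using List.reverseRecOn with
  | nil => exact ⟨le_refl 0, le_refl 0, fun d hd => by simp [pvAB]; omega⟩
  | append_singleton p c ih =>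
    obtain ⟨ha, hb, hrun⟩ := ih
    have hAB : pvAB (p ++ [c]) =
        (if c = '(' then ((pvAB p).1, (pvAB p).2 + 1)
         else if c = ')' then (if (pvAB p).2 > 0 then ((pvAB p).1, (pvAB p).2 - 1)
              else ((pvAB p).1 + 1, (pvAB p).2))
         else pvAB p) := by
      simp [pvAB, List.foldl_append]
    have hfold : ∀ d : Int, (p ++ [c]).foldl pvCharStep d = pvCharStep (p.foldl pvCharStep d) c := by
      intro d; simp [List.foldl_append]
    by_cases h1 : c = '('
    · subst h1
      have hAB' : pvAB (p ++ ['(']) = ((pvAB p).1, (pvAB p).2 + 1) := by rw [hAB]; simp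
      refine ⟨by rw [hAB']; exact ha, by rw [hAB']; omega, fun d hd => ?_⟩
      rw [hAB', hfold, ← hrun d hd]
      simp [pvCharStep]
      omega
    · by_cases h2 : c = ')'
      · subst h2
        by_cases h3 : (pvAB p).2 > 0
        · have hAB' : pvAB (p ++ [')']) = ((pvAB p).1, (pvAB p).2 - 1) := by
            rw [hAB]; simp [h3]
          refine ⟨by rw [hAB']; exact ha, by rw [hAB']; omega, fun d hd => ?_⟩
          rw [hAB', hfold, ← hrun d hd]
          simp [pvCharStep, h1]
          omega
        · have hAB' : pvAB (p ++ [')']) = ((pvAB p).1 + 1, (pvAB p).2) := by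
            rw [hAB]; simp [h3]
          refine ⟨by rw [hAB']; omega, by rw [hAB']; exact hb, fun d hd => ?_⟩
          rw [hAB', hfold, ← hrun d hd]
          simp [pvCharStep, h1]
          omega
      · have hAB' : pvAB (p ++ [c]) = pvAB p := by rw [hAB]; simp [h1, h2]
        refine ⟨by rw [hAB']; exact ha, by rw [hAB']; exact hb, fun d hd => ?_⟩
        rw [hAB', hfold, ← hrun d hd]
        simp [pvCharStep, h1, h2]
    
lemma pvAdvance_run (d : Int) (p : List Char) (hd : 0 ≤ d) :
    pvAdvance d p = p.foldl pvCharStep d := by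
  rw [pvAdvance_eq]; exact (pvAB_spec p).2.2 d hd

lemma pvAdvance_nil (d : Int) (hd : 0 ≤ d) : pvAdvance d [] = d := by
  rw [pvAdvance_run d [] hd]; rfl

lemma pvAdvance_cons (d : Int) (c : Char) (p : List Char) (hd : 0 ≤ d) :
    pvAdvance d (c :: p) = pvAdvance (pvCharStep d c) p := by
  have hd' : 0 ≤ pvCharStep d c := by simp [pvCharStep]; split_ifs <;> omega
  rw [pvAdvance_run d _ hd, pvAdvance_run _ p hd']
  rfl

lemma pvCharStep_nonneg (d : Int) (c : Char) (hd : 0 ≤ d) : 0 ≤ pvCharStep d c := by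
  simp [pvCharStep]; split_ifs <;> omega

-- proof-side view of B's loop with the head piece still merged into the buffer
def pvLoopB' (ps : List (List Char)) (buf : List Char) (d : Int) (out : List String) : List String :=
  match ps with
  | [] => out ++ pvFlushB buf
  | p :: rest => pvLoopB rest (buf ++ p) (pvAdvance d p) out

lemma pvFlush_eq (buf : List Char) : pvFlushA buf = pvFlushB buf := rfl

-- main bridge: A's scan over cs equals B's piece loop over cs.splitOn ','
lemma pvMain (cs : List Char) : ∀ (buf : List Char) (d : Int) (out : List String), 0 ≤ d →
    pvLoopA cs out buf d = pvLoopB' (cs.splitOn ',') buf d out := by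
  induction cs with
  | nil =>
    intro buf d out hd
    simp [pvLoopA, pvLoopB', List.splitOn, List.splitOnP, List.splitOnP.go, pvLoopB,
      pvFlush_eq]
  | cons c rest ih =>
    intro buf d out hd
    obtain ⟨q, qs, hq⟩ := List.exists_cons_of_ne_nil (List.splitOnP_ne_nil (· == ',') rest)
    by_cases hc : c = ','
    · subst hc
      have hsplit : ((',' :: rest).splitOn ',') = [] :: rest.splitOn ',' := by
        simp [List.splitOn, List.splitOnP_cons]
      rw [hsplit]
      by_cases hd0 : d = 0
      · subst hd0
        have hA : pvLoopA (',' :: rest) out buf 0 = pvLoopA rest (out ++ pvFlushA buf) [] 0 := by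
          simp [pvLoopA]
        rw [hA, ih [] 0 _ (le_refl 0)]
        show pvLoopB' (rest.splitOn ',') [] 0 (out ++ pvFlushA buf) =
          pvLoopB' ([] :: rest.splitOn ',') buf 0 out
        rw [show rest.splitOn ',' = q :: qs from hq]
        simp [pvLoopB', pvLoopB, pvAdvance_nil 0 (le_refl 0), pvFlush_eq]
      · have hA : pvLoopA (',' :: rest) out buf d = pvLoopA rest out (buf ++ [',']) d := by
          simp [pvLoopA, hd0]
        rw [hA, ih (buf ++ [',']) d out hd]
        show pvLoopB' (rest.splitOn ',') (buf ++ [',']) d out =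
          pvLoopB' ([] :: rest.splitOn ',') buf d out
        rw [show rest.splitOn ',' = q :: qs from hq]
        simp [pvLoopB', pvLoopB, pvAdvance_nil d hd, hd0]
    · have hsplit : ((c :: rest).splitOn ',') = (c :: q) :: qs := by
        simp [List.splitOn, List.splitOnP_cons, hc]
        rw [show List.splitOnP (· == ',') rest = q :: qs from hq]
        rfl
      have hA : pvLoopA (c :: rest) out buf d = pvLoopA rest out (buf ++ [c]) (pvCharStep d c) := by
        simp only [pvLoopA, pvCharStep]
        have : ¬ (c = ',' ∧ (if c = '(' then d + 1 else if c = ')' ∧ d > 0 then d - 1 else d) = 0) := by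
          intro h; exact hc h.1
        rw [if_neg this]
      rw [hA, ih (buf ++ [c]) _ out (pvCharStep_nonneg d c hd), hsplit]
      rw [show rest.splitOn ',' = q :: qs from hq]
      simp [pvLoopB', pvAdvance_cons d c q hd]

lemma pvSplitCommas_eq (value : String) : pvSplitCommasA value = pvSplitCommasB value := by
  unfold pvSplitCommasA pvSplitCommasB
  rw [pvMain value.toList [] 0 [] (le_refl 0)]
  obtain ⟨q, qs, hq⟩ := List.exists_cons_of_ne_nil (List.splitOnP_ne_nil (· == ',') value.toList)
  rw [show value.toList.splitOn ',' = q :: qs from hq]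
  simp [pvLoopB']

lemma pvOuter (values : List String) (acc : List String) :
    values.foldl (fun result value =>
      if ¬ PySem.Str.isIn "," value then result ++ [value]
      else result ++ pvSplitCommasA value) acc
    = acc ++ values.flatMap (fun value =>
        if PySem.Str.isIn "," value then pvSplitCommasB value else [value]) := by
  induction values generalizing acc with
  | nil => simp
  | cons v vs ih =>
    simp only [List.foldl_cons, List.flatMap_cons, ih]
    by_cases h : PySem.Chars.isIn [','] v.toList
    · simp [h, pvSplitCommas_eq]
    · simp [h]

-- ===== VERDICT (by name: the statement is the Claim_ definition above) =====
theorem split_hierarchical_py_spec : Claim_equal_split_hierarchical_py := by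
  intro values _
  unfold Spec_split_hierarchical_py split_hierarchical_py split_hierarchical_py_alt
  simpa using pvOuter values []
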